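-- pv_equiv track=rewrite | github.com/thatgardnerone/SumOfSquares.py | src/SumOfSquares/basis.py | basis_hom
-- ===== SOURCE A (Python) =====
-- from typing import Iterable, Tuple, List
--
-- def basis_hom(n: int, d: int) -> Iterable[Tuple[int]]:
--     '''Generator for a homogeneous polynomial basis for n variables of degree d,
--     represented as a list of tuples (same as sympy), so that:
--     len(list(basis_hom(n,d))) == binom(n+d-1, d)
--     '''
--     if n == 1:
--         yield (d,)
--     elif d == 0:
--         yield (0,)*n
--     else:
--         for di in range(d+1):
--             for b in basis_hom(n-1, di):
--                 yield b + (d-di,)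
-- ===== SOURCE B (Python) =====
-- def basis_hom(n, d):
--     '''Generator for a homogeneous polynomial basis for n variables of degree d,
--     built bottom-up: a table of rows, rows[i] = basis of the current variable
--     count at degree i, widened one variable at a time (no recursion).'''
--     if n == 1:
--         yield (d,)
--         return
--     if d < 0:
--         return
--     rows = [[(i,)] for i in range(d + 1)]
--     for _ in range(2, n):
--         rows = [[t + (dd - di,) for di in range(dd + 1) for t in rows[di]]
--                 for dd in range(d + 1)]
--     for di in range(d + 1):
--         for t in rows[di]:
--             yield t + (d - di,)
-- ===== Notes on version B (the rewrite author's own statement) =====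
-- stated objective: alternative
-- what changed: Replaces the recursion-over-n generator with an iterative bottom-up dynamic-programming table (rows[i] = basis at degree i), widened one variable at a time, keeping the exact emission order.
-- outside the precondition, e.g. on basis_hom(0, 0): A returns [()], B returns [(0, 0)]; on basis_hom(-2, 0): A returns [()], B returns [(0, 0)]
import Mathlib
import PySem

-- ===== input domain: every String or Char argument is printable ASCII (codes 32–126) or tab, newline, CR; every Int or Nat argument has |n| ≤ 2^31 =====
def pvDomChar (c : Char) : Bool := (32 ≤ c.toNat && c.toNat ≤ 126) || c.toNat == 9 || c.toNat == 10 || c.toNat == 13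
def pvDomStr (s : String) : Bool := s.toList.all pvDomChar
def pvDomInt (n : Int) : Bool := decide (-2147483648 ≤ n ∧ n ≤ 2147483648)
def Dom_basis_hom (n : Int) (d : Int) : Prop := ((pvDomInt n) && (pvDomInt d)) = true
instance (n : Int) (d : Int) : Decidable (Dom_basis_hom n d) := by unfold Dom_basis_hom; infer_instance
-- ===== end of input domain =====

-- B replaces A's recursion-over-n generator with an iterative bottom-up DP table; same output order (objective: alternative).


-- ===== PORT A =====
-- fuel only bounds the recursion depth (Python has no such bound); depth is ≤ n
-- on every input where the Python terminates, so fuel n.toNat + 1 never runs out inside Pre_.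
def basisHomGo : Nat → Int → Int → List (List Int)
  | 0, _, _ => []
  | f + 1, n, d =>
    if n == 1 then [[d]]
    else if d == 0 then [List.replicate n.toNat 0]   -- (0,)*n; Python clamps negative repetition to 0, as toNat does
    else (PySem.List.pyRange 0 (d + 1) 1).foldl
      (fun acc di => acc ++ (basisHomGo f (n - 1) di).map (fun b => b ++ [d - di])) []

def basis_hom (n : Int) (d : Int) : List (List Int) := basisHomGo (n.toNat + 1) n d

-- ===== PORT B =====
def basis_hom_alt (n : Int) (d : Int) : List (List Int) :=
  if n == 1 then [[d]]
  else if d < 0 then []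
  else
    let rows0 : List (List (List Int)) := (PySem.List.pyRange 0 (d + 1) 1).map (fun i => [[i]])
    -- rows[di] is always in range (0 ≤ di ≤ dd ≤ d, rows has length d+1), so pyGetD is exact here
    let step : List (List (List Int)) → List (List (List Int)) := fun rows =>
      (PySem.List.pyRange 0 (d + 1) 1).map (fun dd =>
        (PySem.List.pyRange 0 (dd + 1) 1).flatMap (fun di =>
          (PySem.List.pyGetD rows di []).map (fun t => t ++ [dd - di])))
    let rows := (PySem.List.pyRange 2 n 1).foldl (fun r _ => step r) rows0
    (PySem.List.pyRange 0 (d + 1) 1).flatMap (fun di =>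
      (PySem.List.pyGetD rows di []).map (fun t => t ++ [d - di]))

-- ===== PRECONDITION & SPEC =====
-- Pre_ excludes n ≤ 0 with d ≥ 0: there A either raises RecursionError (d > 0) or returns the
-- empty tuple produced by Python's negative/zero tuple repetition (0,)*n (d = 0), an artefact
-- outside the function's natural domain of at least one variable.
def Pre_basis_hom (n : Int) (d : Int) : Prop := 1 ≤ n ∨ d < 0
instance (n : Int) (d : Int) : Decidable (Pre_basis_hom n d) := by unfold Pre_basis_hom; infer_instance
def pvWitness_basis_hom : Int × Int := (2, 2)

def Spec_basis_hom (n : Int) (d : Int) (out : List (List Int)) : Prop := out = basis_hom_alt n d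
instance (n : Int) (d : Int) (out : List (List Int)) : Decidable (Spec_basis_hom n d out) := by unfold Spec_basis_hom; infer_instance

-- ===== CLAIM (what is proved, stated in full; the proofs are below) =====
def Claim_equal_basis_hom : Prop := ∀ (n : Int) (d : Int), Dom_basis_hom n d → Pre_basis_hom n d → Spec_basis_hom n d (basis_hom n d)

-- ===== LEMMAS AND PROOFS =====

-- Reference function: Aref (k+1) i = A's value for k+1 variables, degree i (k+1 ≥ 1).
def Aref : Nat → Int → List (List Int)
  | 0, _ => []
  | k + 1, i =>
    if k = 0 then [[i]]
    else (PySem.List.pyRange 0 (i + 1) 1).flatMap (fun di => (Aref k di).map (fun b => b ++ [i - di]))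

lemma Aref_zero : ∀ (k : Nat), 1 ≤ k → Aref k 0 = [List.replicate k 0] := by
  intro k
  induction k with
  | zero => omega
  | succ k ih =>
    intro _
    by_cases hk : k = 0
    · subst hk; simp [Aref, List.replicate]
    · have h1 : 1 ≤ k := by omega
      simp only [Aref, if_neg hk]
      rw [show (0 : Int) + 1 = 0 + 1 by ring, PySem.List.pyRange_one_singleton]
      simp [ih h1, List.replicate_succ']

lemma goA_eq : ∀ (f : Nat) (n d : Int), 1 ≤ n → n.toNat ≤ f → basisHomGo f n d = Aref n.toNat d := by
  intro f
  induction f with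
  | zero => intro n d h1 h2; omega
  | succ f ih =>
    intro n d h1 _
    by_cases hn1 : n = 1
    · subst hn1; simp [basisHomGo, Aref]
    · have hn2 : 2 ≤ n := by omega
      have hk : n.toNat = (n - 1).toNat + 1 := by omega
      have hk0 : (n - 1).toNat ≠ 0 := by omega
      have e1 : (n == 1) = false := by simp [hn1]
      by_cases hd : d = 0
      · subst hd
        rw [Aref_zero n.toNat (by omega)]
        simp [basisHomGo, e1]
      · have e2 : (d == 0) = false := by simp [hd]
        simp only [basisHomGo, e1, e2, Bool.false_eq_true, if_false]
        rw [PySem.List.foldl_append_eq_flatMap, hk]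
        simp only [Aref, if_neg hk0, List.nil_append]
        refine List.flatMap_congr ?_
        intro di _
        rw [ih (n - 1) di (by omega) (by omega)]

-- B's row invariant: after widening to k variables the table is pyRange-map of Aref k.
lemma step_rows (d : Int) (k : Nat) (hk : 1 ≤ k) :
    (PySem.List.pyRange 0 (d + 1) 1).map (fun dd =>
      (PySem.List.pyRange 0 (dd + 1) 1).flatMap (fun di =>
        (PySem.List.pyGetD ((PySem.List.pyRange 0 (d + 1) 1).map (fun i => Aref k i)) di []).map
          (fun t => t ++ [dd - di])))
    = (PySem.List.pyRange 0 (d + 1) 1).map (fun i => Aref (k + 1) i) := by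
  refine List.map_congr_left ?_
  intro dd hdd
  rw [PySem.List.mem_pyRange_one] at hdd
  have : Aref (k + 1) dd = (PySem.List.pyRange 0 (dd + 1) 1).flatMap
      (fun di => (Aref k di).map (fun b => b ++ [dd - di])) := by
    simp only [Aref, if_neg (by omega : k ≠ 0)]
  rw [this]
  refine List.flatMap_congr ?_
  intro di hdi
  rw [PySem.List.mem_pyRange_one] at hdi
  rw [PySem.List.pyGetD_map_pyRange_of_nonneg _ _ _ _ (by omega) (by omega)]

lemma foldl_step (d : Int) :
    ∀ (l : List Int) (k : Nat), 1 ≤ k →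
    l.foldl (fun r _ => (PySem.List.pyRange 0 (d + 1) 1).map (fun dd =>
        (PySem.List.pyRange 0 (dd + 1) 1).flatMap (fun di =>
          (PySem.List.pyGetD r di []).map (fun t => t ++ [dd - di]))))
      ((PySem.List.pyRange 0 (d + 1) 1).map (fun i => Aref k i))
    = (PySem.List.pyRange 0 (d + 1) 1).map (fun i => Aref (k + l.length) i) := by
  intro l
  induction l with
  | nil => intro k hk; simp
  | cons x xs ih =>
    intro k hk
    simp only [List.foldl_cons]
    rw [step_rows d k hk, ih (k + 1) (by omega)]
    congr 1
    simp; ring_nf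

theorem basis_hom_spec_aux : ∀ (n d : Int), Pre_basis_hom n d → basis_hom n d = basis_hom_alt n d := by
  intro n d hpre
  by_cases hn1 : n = 1
  · subst hn1
    simp [basis_hom, basisHomGo, basis_hom_alt]
  · have e1 : (n == 1) = false := by simp [hn1]
    by_cases hdneg : d < 0
    · -- n ≠ 1, d < 0: both sides are []
      have e2 : (d == 0) = false := by simp; omega
      have hrange : PySem.List.pyRange 0 (d + 1) 1 = [] :=
        PySem.List.pyRange_one_eq_nil (by omega)
      simp only [basis_hom, basisHomGo, e1, e2, Bool.false_eq_true, if_false,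
        hrange, List.foldl_nil]
      simp [basis_hom_alt, e1, hdneg]
    · -- n ≥ 2, d ≥ 0
      have hn2 : 2 ≤ n := by rcases hpre with h | h; omega; omega
      have hd : 0 ≤ d := by omega
      rw [basis_hom, goA_eq (n.toNat + 1) n d (by omega) (by omega)]
      simp only [basis_hom_alt, e1, Bool.false_eq_true, if_false, if_neg (by omega : ¬ d < 0)]
      have hrows0 : (PySem.List.pyRange 0 (d + 1) 1).map (fun i => [[i]])
          = (PySem.List.pyRange 0 (d + 1) 1).map (fun i => Aref 1 i) := by
        refine List.map_congr_left ?_; intro i _; simp [Aref]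
      rw [hrows0, foldl_step d (PySem.List.pyRange 2 n 1) 1 (by omega)]
      have hkk : 1 + (PySem.List.pyRange 2 n 1).length = (n - 1).toNat := by
        rw [PySem.List.length_pyRange_one 2 n]; omega
      rw [hkk]
      have hstep : Aref n.toNat d = (PySem.List.pyRange 0 (d + 1) 1).flatMap
          (fun di => (Aref ((n - 1).toNat) di).map (fun b => b ++ [d - di])) := by
        have h1 : n.toNat = (n - 1).toNat + 1 := by omega
        rw [h1]
        simp only [Aref, if_neg (by omega : (n - 1).toNat ≠ 0)]
      rw [hstep]
      refine List.flatMap_congr ?_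
      intro di hdi
      rw [PySem.List.mem_pyRange_one] at hdi
      rw [PySem.List.pyGetD_map_pyRange_of_nonneg _ _ _ _ (by omega) (by omega)]

-- ===== VERDICT (by name: the statement is the Claim_ definition above) =====
theorem basis_hom_spec : Claim_equal_basis_hom := by
  intro n d _ hpre
  exact basis_hom_spec_aux n d hpre
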